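-- pv_equiv track=rewrite | github.com/ianpotpie/blast | src/hit_grouping.py | group_hits
-- ===== SOURCE A (Python) =====
-- def group_hits(hits, A, N):
--     """
--     Finds all groups of N non-overlapping hits whose indices are within a distance of A from one another.
--
--     :param hits: a list of seed-hit tuples (db_index, query_index, length)
--     :param A: a distance threshold for grouping hits
--     :param N: the number of hits in each group
--     :return: a new dictionary of hits to their
--     """
--     hits_by_diagonal = {}
--     for db_index, q_index, k in hits:
--         diagonal = db_index - q_index  # the index difference is unique to a diagonal
--         if diagonal not in hits_by_diagonal:
--             hits_by_diagonal[diagonal] = []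
--         hits_by_diagonal[diagonal].append((db_index, q_index, k))
--
--     hit_groups = []
--     for aligned_hits in hits_by_diagonal.values():
--         aligned_hits = sorted(aligned_hits)
--         start = 0  # tracking the start index allows us to avoid re-evaluating subsequences of invalid groups
--         while start <= len(aligned_hits) - N:
--             hit_group = [aligned_hits[start]]
--             valid_group = True
--             for curr in range(start + 1, start + N):
--                 prev_i, prev_j, prev_k = aligned_hits[curr - 1]
--                 curr_i, curr_j, curr_k = aligned_hits[curr]
--                 if curr_i - prev_i <= A:
--                     hit_group.append((curr_i, curr_j, curr_k))
--                 else: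
--                     valid_group = False
--                     start = curr  # if a gap exceeds A, then we can move the start index over the gap
--                     break
--
--             if valid_group:
--                 hit_groups.append(hit_group)
--                 start += 1
--
--     return hit_groups
-- ===== SOURCE B (Python) =====
-- def group_hits(hits, A, N):
--     buckets = {}
--     for db_index, q_index, k in hits:
--         diag = db_index - q_index
--         buckets[diag] = buckets.get(diag, []) + [(db_index, q_index, k)]
--
--     hit_groups = []
--     for bucket in buckets.values():
--         bucket.sort()
--         # split the sorted diagonal into maximal runs of hits whose
--         # consecutive db-index gaps are at most A
--         runs = []
--         run = []
--         for hit in bucket: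
--             if run and hit[0] - run[-1][0] > A:
--                 runs.append(run)
--                 run = []
--             run.append(hit)
--         if run:
--             runs.append(run)
--         # every length-N window of a run is a valid group
--         for run in runs:
--             for s in range(len(run) - N + 1):
--                 hit_groups.append(run[s:s + N])
--     return hit_groups
-- ===== Notes on version B (the rewrite author's own statement) =====
-- stated objective: alternative
-- what changed: The start-jumping while-loop with per-window revalidation is replaced by a two-phase pass per diagonal: split the sorted bucket once into maximal runs at gaps > A, then emit every length-N slice of each run.
import Mathlib
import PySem

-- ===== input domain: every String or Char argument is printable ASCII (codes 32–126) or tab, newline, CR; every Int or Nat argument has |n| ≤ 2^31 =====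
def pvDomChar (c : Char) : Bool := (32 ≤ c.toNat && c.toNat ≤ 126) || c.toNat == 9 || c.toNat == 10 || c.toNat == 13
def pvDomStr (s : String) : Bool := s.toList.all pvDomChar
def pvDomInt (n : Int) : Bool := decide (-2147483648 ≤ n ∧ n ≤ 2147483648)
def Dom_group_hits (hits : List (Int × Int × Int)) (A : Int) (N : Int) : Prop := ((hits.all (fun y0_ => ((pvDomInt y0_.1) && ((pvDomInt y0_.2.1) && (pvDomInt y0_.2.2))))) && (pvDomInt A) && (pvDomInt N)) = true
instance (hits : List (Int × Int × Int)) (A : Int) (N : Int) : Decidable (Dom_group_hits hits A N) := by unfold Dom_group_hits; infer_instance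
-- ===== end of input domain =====

-- B replaces A's start-jumping while-loop by a two-phase pass (split each sorted diagonal
-- into maximal runs at gaps > A, then emit every length-N slice of each run); equal output,
-- similar cost ("alternative").

def pvHit0 : Int × Int × Int := (0, 0, 0)

-- ===== PORT A =====

-- the inner `for curr in range(start+1, start+N)` loop with its break:
-- returns the built group (inl) or the new start set at the break (inr)
def pvInnerA (l : List (Int × Int × Int)) (A stop curr : Int)
    (g : List (Int × Int × Int)) : (List (Int × Int × Int)) ⊕ Int :=
  if h : curr < stop then
    let prev := PySem.List.pyGetD l (curr - 1) pvHit0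
    let c := PySem.List.pyGetD l curr pvHit0
    if c.1 - prev.1 ≤ A then pvInnerA l A stop (curr + 1) (g ++ [c]) else Sum.inr curr
  else Sum.inl g
termination_by (stop - curr).toNat
decreasing_by omega

-- the `while start <= len(aligned_hits) - N` loop; fuel bounds the iteration count
def pvWhileA (l : List (Int × Int × Int)) (A N : Int) :
    Nat → Int → List (List (Int × Int × Int)) → List (List (Int × Int × Int))
  | 0, _, acc => acc
  | fuel + 1, start, acc =>
    if start ≤ (l.length : Int) - N then
      match pvInnerA l A (start + N) (start + 1) [PySem.List.pyGetD l start pvHit0] with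
      | Sum.inl g => pvWhileA l A N fuel (start + 1) (acc ++ [g])
      | Sum.inr c => pvWhileA l A N fuel c acc
    else acc

def group_hits (hits : List (Int × Int × Int)) (A : Int) (N : Int) :
    List (List (Int × Int × Int)) :=
  let d := hits.foldl (fun d h =>
      let diag := h.1 - h.2.1
      let d1 := if d.contains diag then d else d.insert diag []
      d1.insert diag (d1.getD diag [] ++ [h])) PySem.Dict.empty
  d.values.foldl (fun acc b =>
      let l := PySem.List.sorted b (fun x => toLex (x.1, toLex x.2)) false
      pvWhileA l A N (l.length + 1) 0 acc) []

-- ===== PORT B =====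

-- one step of B's run-splitting loop over a sorted bucket
def pvRunStep (A : Int)
    (p : List (List (Int × Int × Int)) × List (Int × Int × Int))
    (h : Int × Int × Int) :
    List (List (Int × Int × Int)) × List (Int × Int × Int) :=
  if p.2 ≠ [] ∧ A < h.1 - (PySem.List.pyGetD p.2 (-1) pvHit0).1 then
    (p.1 ++ [p.2], [h])
  else (p.1, p.2 ++ [h])

-- the maximal runs of a bucket (gaps within a run are ≤ A)
def pvRuns (A : Int) (l : List (Int × Int × Int)) : List (List (Int × Int × Int)) :=
  let q := l.foldl (pvRunStep A) ([], [])
  if q.2 ≠ [] then q.1 ++ [q.2] else q.1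

-- `for s in range(len(run) - N + 1): … run[s:s+N]`
def pvWindows (N : Int) (r : List (Int × Int × Int)) : List (List (Int × Int × Int)) :=
  (PySem.List.pyRange 0 ((r.length : Int) - N + 1) 1).map
    (fun s => PySem.List.slice r (some s) (some (s + N)))

def group_hits_alt (hits : List (Int × Int × Int)) (A : Int) (N : Int) :
    List (List (Int × Int × Int)) :=
  let d := hits.foldl (fun d h => d.modify (h.1 - h.2.1) [] (· ++ [h])) PySem.Dict.empty
  d.values.foldl (fun acc b =>
      let l := PySem.List.sorted b (fun x => toLex (x.1, toLex x.2)) false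
      (pvRuns A l).foldl (fun acc r => acc ++ pvWindows N r) acc) []

-- ===== PRECONDITION & SPEC =====
-- Pre_ excludes exactly the inputs where A raises: with N ≤ 0 and a non-empty hits list,
-- A's while-loop runs `start` past the end of a bucket and `aligned_hits[start]` raises IndexError.
def Pre_group_hits (hits : List (Int × Int × Int)) (A : Int) (N : Int) : Prop :=
  hits = [] ∨ 1 ≤ N
instance (hits : List (Int × Int × Int)) (A : Int) (N : Int) : Decidable (Pre_group_hits hits A N) := by unfold Pre_group_hits; infer_instance

def pvWitness_group_hits : (List (Int × Int × Int)) × Int × Int :=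
  ([(0, 0, 1), (2, 1, 1), (4, 3, 1)], 2, 2)

def Spec_group_hits (hits : List (Int × Int × Int)) (A : Int) (N : Int)
    (out : List (List (Int × Int × Int))) : Prop := out = group_hits_alt hits A N
instance (hits : List (Int × Int × Int)) (A : Int) (N : Int) (out : List (List (Int × Int × Int))) : Decidable (Spec_group_hits hits A N out) := by unfold Spec_group_hits; infer_instance

-- ===== CLAIM (what is proved, stated in full; the proofs are below) =====
def Claim_equal_group_hits : Prop := ∀ (hits : List (Int × Int × Int)) (A : Int) (N : Int), Dom_group_hits hits A N → Pre_group_hits hits A N → Spec_group_hits hits A N (group_hits hits A N)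

-- ===== LEMMAS AND PROOFS =====

theorem pv_pyGetD_append (r t : List (Int × Int × Int)) (j : Int) (hj : 0 ≤ j) :
    PySem.List.pyGetD (r ++ t) ((r.length : Int) + j) pvHit0 = PySem.List.pyGetD t j pvHit0 := by
  obtain ⟨n, rfl⟩ := Int.eq_ofNat_of_zero_le hj
  simp [PySem.List.pyGetD, PySem.List.pyGet?_append_right]

theorem pv_pyGetD_left (r t : List (Int × Int × Int)) (i : Nat) (hi : i < r.length) :
    PySem.List.pyGetD (r ++ t) (i : Int) pvHit0 = PySem.List.pyGetD r (i : Int) pvHit0 := by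
  simp [PySem.List.pyGetD_natCast, List.getD, List.getElem?_append_left hi]

theorem pv_map_range_slice (l : List (Int × Int × Int)) (a b : Nat) (hb : b ≤ l.length) :
    (PySem.List.pyRange (a : Int) (b : Int) 1).map (fun i => PySem.List.pyGetD l i pvHit0)
      = (l.drop a).take (b - a) := by
  rcases Nat.lt_or_ge a b with h | h
  · have hab : (a:Int) < b := by exact_mod_cast h
    rw [PySem.List.pyRange_one_cons hab]
    have : ((a:Int) + 1) = ((a+1 : Nat) : Int) := by push_cast; ring
    rw [List.map_cons, this, pv_map_range_slice l (a+1) b hb]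
    have ha : a < l.length := lt_of_lt_of_le h hb
    rw [List.drop_eq_getElem_cons ha]
    have : b - a = (b - (a+1)) + 1 := by omega
    rw [this, List.take_succ_cons]
    simp [PySem.List.pyGetD_natCast, List.getD, ha]
  · have : PySem.List.pyRange (a:Int) (b:Int) 1 = [] := by
      apply PySem.List.pyRange_one_eq_nil; exact_mod_cast h
    simp [this, Nat.sub_eq_zero_of_le h]

theorem pvInnerA_all (l : List (Int × Int × Int)) (A : Int) (b c : Nat)
    (g : List (Int × Int × Int))
    (hall : ∀ i : Nat, c ≤ i → i < b →
      (PySem.List.pyGetD l (i : Int) pvHit0).1 - (PySem.List.pyGetD l ((i : Int) - 1) pvHit0).1 ≤ A) :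
    pvInnerA l A (b : Int) (c : Int) g
      = Sum.inl (g ++ (PySem.List.pyRange (c : Int) (b : Int) 1).map (fun i => PySem.List.pyGetD l i pvHit0)) := by
  rw [pvInnerA]
  rcases Nat.lt_or_ge c b with h | h
  · have hcb : (c:Int) < b := by exact_mod_cast h
    rw [dif_pos hcb]
    rw [if_pos (hall c le_rfl h)]
    have hc1 : ((c:Int) + 1) = ((c+1 : Nat) : Int) := by push_cast; ring
    rw [hc1, pvInnerA_all l A b (c+1) _ (fun i hi hib => hall i (by omega) hib)]
    rw [PySem.List.pyRange_one_cons hcb, List.map_cons, hc1]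
    simp
  · have hcb : ¬ ((c:Int) < b) := by exact_mod_cast Nat.not_lt.mpr h
    rw [dif_neg hcb]
    rw [PySem.List.pyRange_one_eq_nil (by exact_mod_cast h)]
    simp
termination_by b - c

theorem pvInnerA_fail (l : List (Int × Int × Int)) (A : Int) (b c m : Nat)
    (g : List (Int × Int × Int)) (hcm : c ≤ m) (hmb : m < b)
    (hok : ∀ i : Nat, c ≤ i → i < m →
      (PySem.List.pyGetD l (i : Int) pvHit0).1 - (PySem.List.pyGetD l ((i : Int) - 1) pvHit0).1 ≤ A)
    (hbad : ¬ ((PySem.List.pyGetD l (m : Int) pvHit0).1 - (PySem.List.pyGetD l ((m : Int) - 1) pvHit0).1 ≤ A)) :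
    pvInnerA l A (b : Int) (c : Int) g = Sum.inr (m : Int) := by
  rw [pvInnerA]
  have hcb : (c:Int) < b := by exact_mod_cast lt_of_le_of_lt hcm hmb
  rw [dif_pos hcb]
  rcases Nat.eq_or_lt_of_le hcm with rfl | hlt
  · rw [if_neg hbad]
  · rw [if_pos (hok c le_rfl hlt)]
    have hc1 : ((c:Int) + 1) = ((c+1 : Nat) : Int) := by push_cast; ring
    rw [hc1, pvInnerA_fail l A b (c+1) m _ hlt hmb (fun i hi hib => hok i (by omega) hib) hbad]
termination_by m - c


theorem pvInnerA_inr (l : List (Int × Int × Int)) (A stop curr : Int)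
    (g : List (Int × Int × Int)) (c : Int)
    (h : pvInnerA l A stop curr g = Sum.inr c) : curr ≤ c ∧ c < stop := by
  rw [pvInnerA] at h
  by_cases hcs : curr < stop
  · rw [dif_pos hcs] at h
    by_cases hg : (PySem.List.pyGetD l curr pvHit0).1 - (PySem.List.pyGetD l (curr - 1) pvHit0).1 ≤ A
    · rw [if_pos hg] at h
      have := pvInnerA_inr l A stop (curr + 1) _ c h
      omega
    · rw [if_neg hg] at h
      cases h; omega
  · rw [dif_neg hcs] at h; cases h
termination_by (stop - curr).toNat
decreasing_by omega
theorem pvInnerA_shift (r t : List (Int × Int × Int)) (A b c : Int)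
    (g : List (Int × Int × Int)) (hc : 1 ≤ c)
    (hget : ∀ j : Int, 0 ≤ j → PySem.List.pyGetD (r ++ t) ((r.length : Int) + j) pvHit0 = PySem.List.pyGetD t j pvHit0) :
    pvInnerA (r ++ t) A ((r.length : Int) + b) ((r.length : Int) + c) g
      = Sum.map id (fun x => (r.length : Int) + x) (pvInnerA t A b c g) := by
  rw [pvInnerA, pvInnerA]
  by_cases hcb : c < b
  · rw [dif_pos (by omega), dif_pos hcb]
    have h1 : (r.length : Int) + c - 1 = (r.length : Int) + (c - 1) := by ring
    rw [h1, hget (c-1) (by omega), hget c (by omega)]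
    by_cases hg : (PySem.List.pyGetD t c pvHit0).1 - (PySem.List.pyGetD t (c - 1) pvHit0).1 ≤ A
    · rw [if_pos hg, if_pos hg]
      have h2 : (r.length : Int) + c + 1 = (r.length : Int) + (c + 1) := by ring
      rw [h2, pvInnerA_shift r t A b (c+1) _ (by omega) hget]
    · rw [if_neg hg, if_neg hg]; rfl
  · rw [dif_neg (by omega), dif_neg hcb]; rfl
termination_by (b - c).toNat
decreasing_by omega

theorem pvWhileA_fuel (l : List (Int × Int × Int)) (A N : Int) :
    ∀ f1 f2 : Nat, ∀ s : Int, ∀ acc,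
      ((l.length : Int) - N + 1 - s).toNat ≤ f1 → ((l.length : Int) - N + 1 - s).toNat ≤ f2 →
      pvWhileA l A N f1 s acc = pvWhileA l A N f2 s acc := by
  intro f1
  induction f1 with
  | zero =>
    intro f2 s acc h1 h2
    have hs : ¬ (s ≤ (l.length : Int) - N) := by omega
    cases f2 with
    | zero => rfl
    | succ f2 => simp [pvWhileA, hs]
  | succ f1 ih =>
    intro f2 s acc h1 h2
    by_cases hs : s ≤ (l.length : Int) - N
    · have hb : 1 ≤ ((l.length : Int) - N + 1 - s).toNat := by omega
      cases f2 with
      | zero => omega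
      | succ f2 =>
        simp only [pvWhileA, if_pos hs]
        cases hin : pvInnerA l A (s + N) (s + 1) [PySem.List.pyGetD l s pvHit0] with
        | inl g => exact ih f2 (s+1) (acc ++ [g]) (by omega) (by omega)
        | inr c =>
          have := pvInnerA_inr l A (s+N) (s+1) _ c hin
          exact ih f2 c acc (by omega) (by omega)
    · cases f2 with
      | zero => cases f1 <;> simp [pvWhileA, hs]
      | succ f2 => simp [pvWhileA, hs]

theorem pvWhileA_shift (r t : List (Int × Int × Int)) (A N : Int) :
    ∀ f : Nat, ∀ k : Int, ∀ acc, 0 ≤ k →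
      pvWhileA (r ++ t) A N f ((r.length : Int) + k) acc = pvWhileA t A N f k acc := by
  intro f
  induction f with
  | zero => intro k acc hk; rfl
  | succ f ih =>
    intro k acc hk
    simp only [pvWhileA]
    have hlen : ((r ++ t).length : Int) = (r.length : Int) + (t.length : Int) := by
      simp
    have hguard : ((r.length : Int) + k ≤ ((r ++ t).length : Int) - N) ↔ (k ≤ (t.length : Int) - N) := by
      rw [hlen]; omega
    by_cases hg : k ≤ (t.length : Int) - N
    · rw [if_pos (hguard.mpr hg), if_pos hg]
      have e1 : (r.length : Int) + k + N = (r.length : Int) + (k + N) := by ring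
      have e2 : (r.length : Int) + k + 1 = (r.length : Int) + (k + 1) := by ring
      rw [pv_pyGetD_append r t k hk, e1, e2,
        pvInnerA_shift r t A (k + N) (k + 1) _ (by omega) (fun j hj => pv_pyGetD_append r t j hj)]
      cases hin : pvInnerA t A (k + N) (k + 1) [PySem.List.pyGetD t k pvHit0] with
      | inl g =>
        simp only [Sum.map_inl, id_eq]
        exact ih (k+1) (acc ++ [g]) (by omega)
      | inr c =>
        have := pvInnerA_inr t A (k+N) (k+1) _ c hin
        simp only [Sum.map_inr]
        exact ih c acc (by omega)
    · rw [if_neg (fun hh => hg (hguard.mp hh)), if_neg hg]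

def pvTakeRunFrom (A : Int) (p : Int × Int × Int) :
    List (Int × Int × Int) → List (Int × Int × Int)
  | [] => []
  | h :: rest => if h.1 - p.1 ≤ A then h :: pvTakeRunFrom A h rest else []
def pvDropRunFrom (A : Int) (p : Int × Int × Int) :
    List (Int × Int × Int) → List (Int × Int × Int)
  | [] => []
  | h :: rest => if h.1 - p.1 ≤ A then pvDropRunFrom A h rest else h :: rest


theorem pv_tdr_append (A : Int) (p : Int × Int × Int) (l : List (Int × Int × Int)) :
    pvTakeRunFrom A p l ++ pvDropRunFrom A p l = l := by
  induction l generalizing p with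
  | nil => rfl
  | cons h rest ih =>
    simp only [pvTakeRunFrom, pvDropRunFrom]
    by_cases hg : h.1 - p.1 ≤ A
    · simp [hg, ih h]
    · simp [hg]

theorem pv_takeRun_chain (A : Int) (p : Int × Int × Int) (l : List (Int × Int × Int)) :
    List.IsChain (fun x y : Int × Int × Int => y.1 - x.1 ≤ A) (p :: pvTakeRunFrom A p l) := by
  induction l generalizing p with
  | nil => simp [pvTakeRunFrom]
  | cons h rest ih =>
    simp only [pvTakeRunFrom]
    by_cases hg : h.1 - p.1 ≤ A
    · rw [if_pos hg]
      exact (ih h).cons (by simpa using hg)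
    · simp [hg]

theorem pv_dropRun_bound (A : Int) (p : Int × Int × Int) (l : List (Int × Int × Int))
    (h : Int × Int × Int) (t' : List (Int × Int × Int))
    (hd : pvDropRunFrom A p l = h :: t') :
    A < h.1 - ((p :: pvTakeRunFrom A p l).getLast (by simp)).1 := by
  induction l generalizing p with
  | nil => simp [pvDropRunFrom] at hd
  | cons x rest ih =>
    simp only [pvDropRunFrom] at hd
    by_cases hg : x.1 - p.1 ≤ A
    · rw [if_pos hg] at hd
      have := ih x hd
      simp only [pvTakeRunFrom, if_pos hg]
      rwa [List.getLast_cons (by simp)]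
    · rw [if_neg hg] at hd
      cases hd
      simp only [pvTakeRunFrom, if_neg hg]
      simp
      omega
  
theorem pv_dropRun_len (A : Int) (p : Int × Int × Int) (l : List (Int × Int × Int)) :
    (pvDropRunFrom A p l).length ≤ l.length := by
  induction l generalizing p with
  | nil => simp [pvDropRunFrom]
  | cons x rest ih =>
    simp only [pvDropRunFrom]
    by_cases hg : x.1 - p.1 ≤ A
    · rw [if_pos hg]; exact le_trans (ih x) (by simp)
    · rw [if_neg hg]

def pvFin (A : Int) (l : List (Int × Int × Int))
    (q : List (List (Int × Int × Int)) × List (Int × Int × Int)) :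
    List (List (Int × Int × Int)) :=
  let q' := l.foldl (pvRunStep A) q
  if q'.2 ≠ [] then q'.1 ++ [q'.2] else q'.1

theorem pvFin_cons (A : Int) (x : Int × Int × Int) (l : List (Int × Int × Int))
    (q : List (List (Int × Int × Int)) × List (Int × Int × Int)) :
    pvFin A (x :: l) q = pvFin A l (pvRunStep A q x) := rfl

theorem pvFin_acc (A : Int) (l : List (Int × Int × Int)) :
    ∀ (rs : List (List (Int × Int × Int))) (run : List (Int × Int × Int)),
    pvFin A l (rs, run) = rs ++ pvFin A l ([], run) := by
  induction l with
  | nil =>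
    intro rs run
    simp only [pvFin, List.foldl_nil]
    by_cases h : run = [] <;> simp [h]
  | cons x rest ih =>
    intro rs run
    rw [pvFin_cons, pvFin_cons]
    simp only [pvRunStep]
    by_cases h : run ≠ [] ∧ A < x.1 - (PySem.List.pyGetD run (-1) pvHit0).1
    · simp only [if_pos h]
      rw [ih (rs ++ [run]) [x], ih ([] ++ [run]) [x]]
      simp
    · simp only [if_neg h]
      exact ih rs (run ++ [x])

theorem pvFin_run (A : Int) :
    ∀ (l r : List (Int × Int × Int)) (hr : r ≠ []),
      pvFin A l ([], r)
        = (r ++ pvTakeRunFrom A (r.getLast hr) l) :: pvRuns A (pvDropRunFrom A (r.getLast hr) l) := by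
  intro l
  induction l with
  | nil =>
    intro r hr
    simp [pvFin, pvTakeRunFrom, pvDropRunFrom, pvRuns, hr]
  | cons x rest ih =>
    intro r hr
    rw [pvFin_cons]
    simp only [pvRunStep]
    have hlast : PySem.List.pyGetD r (-1) pvHit0 = r.getLast hr :=
      PySem.List.pyGetD_neg_one r pvHit0 hr
    by_cases hg : x.1 - (r.getLast hr).1 ≤ A
    · have hcond : ¬ (r ≠ [] ∧ A < x.1 - (PySem.List.pyGetD r (-1) pvHit0).1) := by
        rw [hlast]; intro hh; omega
      rw [if_neg hcond, ih (r ++ [x]) (by simp)]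
      have hl2 : (r ++ [x]).getLast (by simp) = x := by simp
      rw [hl2]
      simp only [pvTakeRunFrom, pvDropRunFrom, if_pos hg]
      simp
    · have hcond : (r ≠ [] ∧ A < x.1 - (PySem.List.pyGetD r (-1) pvHit0).1) := by
        rw [hlast]; exact ⟨hr, by omega⟩
      rw [if_pos hcond, pvFin_acc A rest ([] ++ [r]) [x]]
      simp only [pvTakeRunFrom, pvDropRunFrom, if_neg hg]
      have hx : pvRuns A (x :: rest) = pvFin A rest ([], [x]) := by
        simp [pvRuns, pvFin, List.foldl_cons, pvRunStep]
      rw [hx]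
      simp

theorem pvRuns_cons (A : Int) (h : Int × Int × Int) (t : List (Int × Int × Int)) :
    pvRuns A (h :: t) = (h :: pvTakeRunFrom A h t) :: pvRuns A (pvDropRunFrom A h t) := by
  have h1 : pvRuns A (h :: t) = pvFin A t ([], [h]) := by
    simp [pvRuns, pvFin, List.foldl_cons, pvRunStep]
  rw [h1, pvFin_run A t [h] (by simp)]
  simp

def pvWinFrom (N : Int) (r : List (Int × Int × Int)) (s : Nat) :
    List (List (Int × Int × Int)) :=
  (PySem.List.pyRange (s : Int) ((r.length : Int) - N + 1) 1).map
    (fun i => PySem.List.slice r (some i) (some (i + N)))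

-- gap translation inside r++t
theorem pv_gap_in_r (r t : List (Int × Int × Int)) (A : Int)
    (hch : List.IsChain (fun x y : Int × Int × Int => y.1 - x.1 ≤ A) r)
    (i : Nat) (h1 : 1 ≤ i) (hi : i < r.length) :
    (PySem.List.pyGetD (r ++ t) (i : Int) pvHit0).1
      - (PySem.List.pyGetD (r ++ t) ((i : Int) - 1) pvHit0).1 ≤ A := by
  have e1 : ((i : Int) - 1) = ((i - 1 : Nat) : Int) := by omega
  rw [e1, pv_pyGetD_left r t i hi, pv_pyGetD_left r t (i-1) (by omega)]
  have h2 : i - 1 < r.length := by omega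
  simp only [PySem.List.pyGetD_natCast, List.getD, List.getElem?_eq_getElem hi,
    List.getElem?_eq_getElem h2, Option.getD_some]
  have := List.isChain_iff_getElem.mp hch (i-1) (by omega)
  simp only [Nat.sub_add_cancel h1] at this
  exact this

theorem pvRunLemma (r t : List (Int × Int × Int)) (A N : Int) (hN : 1 ≤ N) (hr : r ≠ [])
    (hch : List.IsChain (fun x y : Int × Int × Int => y.1 - x.1 ≤ A) r)
    (hbd : ∀ h t', t = h :: t' → A < h.1 - (r.getLast hr).1) :
    ∀ (s : Nat) (f1 f2 : Nat) acc, s ≤ r.length →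
      (((r ++ t).length : Int) - N + 1 - s).toNat ≤ f1 →
      ((t.length : Int) - N + 1).toNat ≤ f2 →
      pvWhileA (r ++ t) A N f1 (s : Int) acc = pvWhileA t A N f2 0 (acc ++ pvWinFrom N r s) := by
  intro s
  induction hs : r.length - s using Nat.strong_induction_on generalizing s with
  | _ d ihd =>
  intro f1 f2 acc hsr hf1 hf2
  have hlen : ((r ++ t).length : Int) = (r.length : Int) + (t.length : Int) := by simp
  by_cases hguard : (s : Int) ≤ ((r ++ t).length : Int) - N
  · -- loop body runs
    obtain ⟨f1', rfl⟩ : ∃ f1', f1 = f1' + 1 := by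
      cases f1 with
      | zero => exfalso; omega
      | succ f => exact ⟨f, rfl⟩
    rcases Nat.lt_or_ge s r.length with hslt | hsge
    · -- s < |r|
      have hNn : N = ((N.toNat : Nat) : Int) := by omega
      by_cases hwin : s + N.toNat ≤ r.length
      · -- full window inside r
        have hall : ∀ i : Nat, s + 1 ≤ i → i < s + N.toNat →
            (PySem.List.pyGetD (r ++ t) (i : Int) pvHit0).1
              - (PySem.List.pyGetD (r ++ t) ((i : Int) - 1) pvHit0).1 ≤ A := by
          intro i hi1 hi2
          exact pv_gap_in_r r t A hch i (by omega) (by omega)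
        have hinner := pvInnerA_all (r ++ t) A (s + N.toNat) (s + 1)
          [PySem.List.pyGetD (r ++ t) (s : Int) pvHit0] hall
        rw [pvWhileA]
        rw [if_pos hguard]
        have ecast1 : (s : Int) + N = ((s + N.toNat : Nat) : Int) := by push_cast; omega
        have ecast2 : (s : Int) + 1 = ((s + 1 : Nat) : Int) := by push_cast; ring
        rw [ecast1, ecast2, hinner]
        dsimp only
        -- the window value
        have hwinval :
            [PySem.List.pyGetD (r ++ t) (s : Int) pvHit0]
              ++ (PySem.List.pyRange ((s + 1 : Nat) : Int) ((s + N.toNat : Nat) : Int) 1).map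
                  (fun i => PySem.List.pyGetD (r ++ t) i pvHit0)
            = PySem.List.slice r (some (s : Int)) (some ((s : Int) + N)) := by
          have hmap : (PySem.List.pyRange ((s : Nat) : Int) ((s + N.toNat : Nat) : Int) 1).map
                  (fun i => PySem.List.pyGetD (r ++ t) i pvHit0)
              = ((r ++ t).drop s).take (s + N.toNat - s) := by
            apply pv_map_range_slice (r ++ t) s (s + N.toNat) (by simp only [List.length_append]; omega)
          have hcons : PySem.List.pyRange ((s : Nat) : Int) ((s + N.toNat : Nat) : Int) 1
              = (s : Int) :: PySem.List.pyRange ((s + 1 : Nat) : Int) ((s + N.toNat : Nat) : Int) 1 := by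
            rw [PySem.List.pyRange_one_cons (by push_cast; omega)]
            norm_cast
          rw [hcons, List.map_cons] at hmap
          rw [show s + N.toNat - s = N.toNat by omega] at hmap
          have hdrop : ((r ++ t).drop s).take N.toNat = (r.drop s).take N.toNat := by
            rw [List.drop_append_of_le_length (by omega), List.take_append_of_le_length (by simp only [List.length_drop]; omega)]
          rw [hdrop] at hmap
          rw [show ((s:Int) + N) = ((s:Int) + (N.toNat : Int)) by omega]
          rw [PySem.List.slice_natCast_add]
          simpa using hmap
        rw [hwinval]
        -- recurse
        have hrec := ihd (r.length - (s+1)) (by omega) (s+1) rfl f1' f2 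
          (acc ++ [PySem.List.slice r (some (s : Int)) (some ((s : Int) + N))])
          (by omega) (by simp at hf1 ⊢; omega) hf2
        rw [hrec]
        -- windows cons
        have hwf : pvWinFrom N r s
            = PySem.List.slice r (some (s : Int)) (some ((s : Int) + N)) :: pvWinFrom N r (s + 1) := by
          unfold pvWinFrom
          rw [PySem.List.pyRange_one_cons (by push_cast; omega)]
          rw [List.map_cons]
          norm_cast
        rw [hwf]
        simp
      · -- window crosses the boundary: inner loop fails at m = |r|
        have ht : t ≠ [] := by
          intro hte
          subst hte
          simp at hguard hlen
          omega
        obtain ⟨h0, t', rfl⟩ : ∃ h0 t', t = h0 :: t' := by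
          cases t with
          | nil => exact absurd rfl ht
          | cons a b => exact ⟨a, b, rfl⟩
        have hbad : ¬ ((PySem.List.pyGetD (r ++ h0 :: t') ((r.length : Nat) : Int) pvHit0).1
            - (PySem.List.pyGetD (r ++ h0 :: t') (((r.length : Nat) : Int) - 1) pvHit0).1 ≤ A) := by
          have e0 : ((r.length : Nat) : Int) = (r.length : Int) + 0 := by ring
          have hv1 : PySem.List.pyGetD (r ++ h0 :: t') ((r.length : Nat) : Int) pvHit0 = h0 := by
            rw [e0, pv_pyGetD_append r _ 0 le_rfl]
            simp [PySem.List.pyGetD]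
          have e1 : ((r.length : Nat) : Int) - 1 = ((r.length - 1 : Nat) : Int) := by
            have : 0 < r.length := List.length_pos_iff.mpr hr
            omega
          have hv2 : PySem.List.pyGetD (r ++ h0 :: t') (((r.length : Nat) : Int) - 1) pvHit0
              = r.getLast hr := by
            rw [e1, pv_pyGetD_left r _ (r.length - 1) (by have := List.length_pos_iff.mpr hr; omega)]
            have hlt : r.length - 1 < r.length := by have := List.length_pos_iff.mpr hr; omega
            simp only [PySem.List.pyGetD_natCast, List.getD, List.getElem?_eq_getElem hlt, Option.getD_some]
            rw [List.getLast_eq_getElem]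
          rw [hv1, hv2]
          have := hbd h0 t' rfl
          omega
        have hok : ∀ i : Nat, s + 1 ≤ i → i < r.length →
            (PySem.List.pyGetD (r ++ h0 :: t') (i : Int) pvHit0).1
              - (PySem.List.pyGetD (r ++ h0 :: t') ((i : Int) - 1) pvHit0).1 ≤ A := by
          intro i h1 h2
          exact pv_gap_in_r r _ A hch i (by omega) h2
        have hinner := pvInnerA_fail (r ++ h0 :: t') A (s + N.toNat) (s + 1) r.length
          [PySem.List.pyGetD (r ++ h0 :: t') (s : Int) pvHit0] (by omega) (by omega) hok hbad
        rw [pvWhileA, if_pos hguard]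
        have ecast1 : (s : Int) + N = ((s + N.toNat : Nat) : Int) := by push_cast; omega
        have ecast2 : (s : Int) + 1 = ((s + 1 : Nat) : Int) := by push_cast; ring
        rw [ecast1, ecast2, hinner]
        dsimp only
        have hrec := ihd 0 (by omega) r.length (by omega) f1' f2 acc le_rfl
          (by simp at hf1 ⊢; omega) hf2
        rw [hrec]
        have hw1 : pvWinFrom N r s = [] := by
          unfold pvWinFrom
          rw [PySem.List.pyRange_one_eq_nil (by push_cast; omega)]
          rfl
        have hw2 : pvWinFrom N r r.length = [] := by
          unfold pvWinFrom
          rw [PySem.List.pyRange_one_eq_nil (by push_cast; omega)]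
          rfl
        rw [hw1, hw2]
    · -- s = |r|: shift into t
      have hseq : s = r.length := by omega
      subst hseq
      have hshift := pvWhileA_shift r t A N (f1' + 1) 0 acc (le_refl 0)
      rw [show ((r.length : Nat) : Int) = (r.length : Int) + 0 by ring, hshift]
      have hw : pvWinFrom N r r.length = [] := by
        unfold pvWinFrom
        rw [PySem.List.pyRange_one_eq_nil (by push_cast; omega)]
        rfl
      rw [hw, List.append_nil]
      apply pvWhileA_fuel t A N (f1' + 1) f2 0 acc
      · rw [hlen] at hf1; simp at hf1 ⊢; omega
      · simpa using hf2
  · -- guard false: everything stops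
    have hstop1 : pvWhileA (r ++ t) A N f1 (s : Int) acc = acc := by
      cases f1 with
      | zero => rfl
      | succ f => rw [pvWhileA, if_neg hguard]
    have htguard : ¬ ((0 : Int) ≤ (t.length : Int) - N) := by
      rw [hlen] at hguard; omega
    have hstop2 : ∀ acc', pvWhileA t A N f2 0 acc' = acc' := by
      intro acc'
      cases f2 with
      | zero => rfl
      | succ f => rw [pvWhileA, if_neg htguard]
    have hw : pvWinFrom N r s = [] := by
      unfold pvWinFrom
      rw [PySem.List.pyRange_one_eq_nil (by rw [hlen] at hguard; push_cast; omega)]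
      rfl
    rw [hstop1, hstop2, hw, List.append_nil]

theorem pv_step_eq (d : PySem.Dict Int (List (Int × Int × Int))) (h : Int × Int × Int) :
    (let diag := h.1 - h.2.1
     let d1 := if d.contains diag then d else d.insert diag []
     d1.insert diag (d1.getD diag [] ++ [h]))
      = d.modify (h.1 - h.2.1) [] (· ++ [h]) := by
  dsimp only
  rw [PySem.Dict.modify]
  by_cases hc : d.contains (h.1 - h.2.1) = true
  · rw [if_pos hc]
  · rw [if_neg hc]
    have hany : d.items.any (fun p => p.1 == (h.1 - h.2.1)) = false := by
      rw [PySem.Dict.contains] at hc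
      exact Bool.eq_false_iff.mpr hc
    have hpt : ∀ p ∈ d.items, (p.1 == (h.1 - h.2.1)) = false := by
      intro p hp
      exact Bool.eq_false_iff.mpr (List.any_eq_false.mp hany p hp)
    have hfind : d.items.find? (fun p => p.1 == (h.1 - h.2.1)) = none := by
      rw [List.find?_eq_none]
      exact fun p hp => Bool.eq_false_iff.mp (hpt p hp)
    have hins : d.insert (h.1 - h.2.1) [] = PySem.Dict.mk (d.items ++ [(h.1 - h.2.1, [])]) := by
      rw [PySem.Dict.insert, if_neg (by simpa [PySem.Dict.contains] using hc)]
    rw [hins]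
    have hc2 : (PySem.Dict.mk (d.items ++ [(h.1 - h.2.1, ([] : List (Int × Int × Int)))])).contains (h.1 - h.2.1) = true := by
      simp [PySem.Dict.contains]
    have hget : (PySem.Dict.mk (d.items ++ [(h.1 - h.2.1, ([] : List (Int × Int × Int)))])).getD (h.1 - h.2.1) [] = [] := by
      simp [PySem.Dict.getD, PySem.Dict.get?, List.find?_append, hfind]
    have hgetd : d.getD (h.1 - h.2.1) [] = [] := by
      simp [PySem.Dict.getD, PySem.Dict.get?, hfind]
    rw [hget, hgetd]
    rw [PySem.Dict.insert, if_pos hc2, PySem.Dict.insert, if_neg (by simpa [PySem.Dict.contains] using hc)]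
    congr 1
    rw [List.map_append]
    have hid : d.items.map (fun p => if p.1 == (h.1 - h.2.1) then (h.1 - h.2.1, [] ++ [h]) else p) = d.items := by
      rw [List.map_congr_left (g := id) (fun p hp => by simp [hpt p hp]), List.map_id]
    rw [hid]
    simp

theorem pvTop (A N : Int) (hN : 1 ≤ N) :
    ∀ (l : List (Int × Int × Int)) (f : Nat) acc, ((l.length : Int) - N + 1).toNat ≤ f →
      pvWhileA l A N f 0 acc
        = (pvRuns A l).foldl (fun a r => a ++ pvWindows N r) acc := by
  intro l
  induction hd : l.length using Nat.strong_induction_on generalizing l with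
  | _ d ihd =>
  intro f acc hf
  cases l with
  | nil =>
    have hstop : pvWhileA [] A N f 0 acc = acc := by
      cases f with
      | zero => rfl
      | succ f => rw [pvWhileA, if_neg (by simp; omega)]
    rw [hstop]
    rfl
  | cons x t0 =>
    have hsplit : (x :: pvTakeRunFrom A x t0) ++ pvDropRunFrom A x t0 = x :: t0 := by
      rw [List.cons_append, pv_tdr_append]
    have hrun := pvRunLemma (x :: pvTakeRunFrom A x t0) (pvDropRunFrom A x t0) A N hN
      (by simp) (pv_takeRun_chain A x t0)
      (fun h0 t' ht => pv_dropRun_bound A x t0 h0 t' ht)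
      0 f (((pvDropRunFrom A x t0).length : Int) - N + 1).toNat acc (by omega)
      (by rw [hsplit]; have hd2 := hd; simp at hf hd2 ⊢; omega) le_rfl
    rw [hsplit] at hrun
    have hcast : ((0 : Nat) : Int) = (0 : Int) := rfl
    rw [hcast] at hrun
    rw [hrun]
    have hwf0 : pvWinFrom N (x :: pvTakeRunFrom A x t0) 0
        = pvWindows N (x :: pvTakeRunFrom A x t0) := by
      unfold pvWinFrom pvWindows
      norm_num
    rw [hwf0]
    have hlen2 : (pvDropRunFrom A x t0).length < d := by
      have := pv_dropRun_len A x t0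
      simp at hd
      omega
    rw [ihd (pvDropRunFrom A x t0).length hlen2 (pvDropRunFrom A x t0) rfl
      (((pvDropRunFrom A x t0).length : Int) - N + 1).toNat
      (acc ++ pvWindows N (x :: pvTakeRunFrom A x t0)) le_rfl]
    rw [pvRuns_cons]
    rfl

theorem pv_bucket_fold (A N : Int) (hN : 1 ≤ N) :
    ∀ (bs : List (List (Int × Int × Int))) acc,
      bs.foldl (fun acc b =>
        let l := PySem.List.sorted b (fun x => toLex (x.1, toLex x.2)) false
        pvWhileA l A N (l.length + 1) 0 acc) acc
      = bs.foldl (fun acc b =>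
        let l := PySem.List.sorted b (fun x => toLex (x.1, toLex x.2)) false
        (pvRuns A l).foldl (fun acc r => acc ++ pvWindows N r) acc) acc := by
  intro bs
  induction bs with
  | nil => intro acc; rfl
  | cons b rest ih =>
    intro acc
    simp only [List.foldl_cons]
    rw [pvTop A N hN _ _ acc (by omega)]
    exact ih _

-- ===== VERDICT (by name: the statement is the Claim_ definition above) =====
theorem group_hits_spec : Claim_equal_group_hits := by
  intro hits A N hdom hpre
  unfold Spec_group_hits
  rcases hpre with rfl | hN
  · rfl
  · unfold group_hits group_hits_alt
    have hd : hits.foldl (fun d h =>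
        let diag := h.1 - h.2.1
        let d1 := if d.contains diag then d else d.insert diag []
        d1.insert diag (d1.getD diag [] ++ [h])) PySem.Dict.empty
      = hits.foldl (fun d h => d.modify (h.1 - h.2.1) [] (· ++ [h])) PySem.Dict.empty := by
      congr 1
      funext d h
      exact pv_step_eq d h
    rw [hd]
    exact pv_bucket_fold A N hN _ []
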